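-- pv_equiv track=rewrite | github.com/lhr791/activity-pipeline | summarizer.py | events_are_same
-- ===== SOURCE A (Python) =====
-- def events_are_same(new_events: list[dict], old_events: list[dict] | None) -> bool:
--     """Check if the new event set is essentially the same as the old one."""
--     if old_events is None:
--         return False
--
--     # Compare by event names + exchanges (normalized)
--     def event_key(e: dict) -> str:
--         return f"{e.get('exchange', '').lower()}:{e.get('event_name', '').lower()}:{str(e.get('end_date', ''))[:10]}"
--
--     new_keys = sorted(event_key(e) for e in new_events)
--     old_keys = sorted(event_key(e) for e in old_events)
--     return new_keys == old_keys
-- ===== SOURCE B (Python) =====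
-- def events_are_same(new_events: list[dict], old_events: list[dict] | None) -> bool:
--     """Check if the new event set is essentially the same as the old one."""
--     if old_events is None:
--         return False
--     if len(new_events) != len(old_events):
--         return False
--
--     def event_key(e: dict) -> str:
--         return f"{e.get('exchange', '').lower()}:{e.get('event_name', '').lower()}:{str(e.get('end_date', ''))[:10]}"
--
--     remaining = [event_key(e) for e in new_events]
--     for e in old_events:
--         k = event_key(e)
--         if k in remaining:
--             remaining.remove(k)
--         else:
--             return False
--     return True
-- ===== Notes on version B (the rewrite author's own statement) =====
-- stated objective: alternative
-- what changed: Replaces A's sort-both-key-lists-and-compare with a length guard followed by a single consume pass that removes each old event's normalized key from the list of new keys, returning False early on a missing key.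
import Mathlib
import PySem

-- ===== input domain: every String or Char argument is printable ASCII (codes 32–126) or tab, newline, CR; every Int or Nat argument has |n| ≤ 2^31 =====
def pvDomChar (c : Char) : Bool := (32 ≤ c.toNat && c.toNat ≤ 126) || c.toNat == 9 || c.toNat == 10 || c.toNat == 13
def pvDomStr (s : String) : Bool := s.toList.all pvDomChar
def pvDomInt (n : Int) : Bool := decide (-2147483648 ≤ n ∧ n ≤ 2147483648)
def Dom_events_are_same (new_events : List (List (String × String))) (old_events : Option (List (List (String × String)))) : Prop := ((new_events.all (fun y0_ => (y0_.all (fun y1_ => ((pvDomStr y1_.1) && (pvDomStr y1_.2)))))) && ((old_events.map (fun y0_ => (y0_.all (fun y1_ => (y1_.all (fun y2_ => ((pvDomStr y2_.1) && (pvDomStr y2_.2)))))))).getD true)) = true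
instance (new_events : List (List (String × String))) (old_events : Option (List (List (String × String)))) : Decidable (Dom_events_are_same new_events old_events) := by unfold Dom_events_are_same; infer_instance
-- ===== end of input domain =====

-- B replaces sort-both-key-lists-and-compare by a length guard plus a single consume pass
-- over the old events that removes each normalized key from the new-key list (alternative
-- decomposition, same cost). Equality is about the RETURN value only (neither mutates input).

-- ===== PORT A =====
-- event_key(e): "{exchange.lower()}:{event_name.lower()}:{str(end_date)[:10]}" (shared normalization helper)
def pvEventKey (e : List (String × String)) : String :=
  PySem.Str.lower (PySem.Dict.getD (PySem.Dict.mk e) "exchange" "") ++ ":" ++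
  PySem.Str.lower (PySem.Dict.getD (PySem.Dict.mk e) "event_name" "") ++ ":" ++
  PySem.Str.slice (PySem.Dict.getD (PySem.Dict.mk e) "end_date" "") none (some 10)

def events_are_same (new_events : List (List (String × String))) (old_events : Option (List (List (String × String)))) : Bool :=
  match old_events with
  | none => false
  | some olds =>
    let new_keys := PySem.List.sorted (new_events.map pvEventKey) (fun x => x) false
    let old_keys := PySem.List.sorted (olds.map pvEventKey) (fun x => x) false
    new_keys == old_keys

-- ===== PORT B =====
-- the for-loop of Source B: consume each old event's key from the remaining new keys, early False
def pvConsume : List (List (String × String)) → List String → Bool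
  | [], _ => true
  | e :: rest, remaining =>
    let k := pvEventKey e
    if k ∈ remaining then pvConsume rest (remaining.erase k) else false

def events_are_same_alt (new_events : List (List (String × String))) (old_events : Option (List (List (String × String)))) : Bool :=
  match old_events with
  | none => false
  | some olds =>
    if new_events.length ≠ olds.length then false
    else pvConsume olds (new_events.map pvEventKey)

-- ===== PRECONDITION & SPEC =====
def Spec_events_are_same (new_events : List (List (String × String))) (old_events : Option (List (List (String × String)))) (out : Bool) : Prop := out = events_are_same_alt new_events old_events
instance (new_events : List (List (String × String))) (old_events : Option (List (List (String × String)))) (out : Bool) : Decidable (Spec_events_are_same new_events old_events out) := by unfold Spec_events_are_same; infer_instance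

-- ===== CLAIM (what is proved, stated in full; the proofs are below) =====
def Claim_equal_events_are_same : Prop := ∀ (new_events : List (List (String × String))) (old_events : Option (List (List (String × String)))), Dom_events_are_same new_events old_events → Spec_events_are_same new_events old_events (events_are_same new_events old_events)

-- ===== LEMMAS AND PROOFS =====

-- the consume loop succeeds iff the remaining keys are a permutation of the old keys,
-- given that the lengths agree (which B's guard ensures)
theorem pvConsume_eq_true_iff (olds : List (List (String × String))) (remaining : List String)
    (hlen : remaining.length = olds.length) :
    pvConsume olds remaining = true ↔ remaining.Perm (olds.map pvEventKey) := by
  induction olds generalizing remaining with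
  | nil =>
    have : remaining = [] := List.eq_nil_of_length_eq_zero hlen
    subst this
    simp [pvConsume]
  | cons e rest ih =>
    simp only [pvConsume, List.map_cons]
    by_cases hmem : pvEventKey e ∈ remaining
    · simp only [hmem, if_pos]
      have hlen' : (remaining.erase (pvEventKey e)).length = rest.length := by
        rw [List.length_erase_of_mem hmem]
        simp at hlen ⊢
        omega
      rw [ih _ hlen']
      constructor
      · intro h
        exact ((List.perm_cons_erase hmem).trans (h.cons _))
      · intro h
        have := h.erase (pvEventKey e)
        simpa using this
    · simp only [hmem, if_neg, not_false_iff]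
      constructor
      · intro h; exact absurd h (by simp)
      · intro h
        exact absurd (h.mem_iff.mpr (by simp)) hmem

theorem events_are_same_spec : Claim_equal_events_are_same := by
  intro new_events old_events _
  unfold Spec_events_are_same events_are_same events_are_same_alt
  cases old_events with
  | none => rfl
  | some olds =>
    simp only
    by_cases hlen : new_events.length = olds.length
    · rw [if_neg (by simpa using hlen)]
      have hl : (new_events.map pvEventKey).length = olds.length := by simpa using hlen
      have hiff := pvConsume_eq_true_iff olds (new_events.map pvEventKey) hl
      have hA : (PySem.List.sorted (new_events.map pvEventKey) (fun x => x) false =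
          PySem.List.sorted (olds.map pvEventKey) (fun x => x) false) ↔
          (new_events.map pvEventKey).Perm (olds.map pvEventKey) :=
        PySem.List.sorted_id_eq_sorted_id_iff_perm _ _
      rcases h : pvConsume olds (new_events.map pvEventKey) with _ | _
      · -- consume returned false: sorted lists differ
        have : ¬ (new_events.map pvEventKey).Perm (olds.map pvEventKey) := by
          intro hp; exact absurd (hiff.mpr hp) (by simp [h])
        simpa [beq_iff_eq, hA] using this
      · have hp := hiff.mp h
        simp [beq_iff_eq, hA.mpr hp]
    · rw [if_pos (by simpa using hlen)]
      -- different lengths ⇒ sorted key lists differ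
      have : PySem.List.sorted (new_events.map pvEventKey) (fun x => x) false ≠
          PySem.List.sorted (olds.map pvEventKey) (fun x => x) false := by
        intro heq
        have := congrArg List.length heq
        simp [PySem.List.length_sorted] at this
        exact hlen this
      simpa [beq_iff_eq] using this
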